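-- pv_equiv track=rewrite | github.com/devluz2023/Algorithms | algoritmo_guloso.py | troco_minimo
-- ===== SOURCE A (Python) =====
-- def troco_minimo(valor, moedas):
--     """
--     Função para calcular o troco mínimo utilizando o algoritmo guloso.
--
--     Argumentos:
--     valor -- O valor do troco a ser dado.
--     moedas -- Uma lista das denominações das moedas disponíveis.
--
--     Retorna:
--     Uma lista das moedas necessárias para o troco.
--     """
--     moedas.sort(reverse=True)  # Ordena as moedas em ordem decrescente
--
--     troco = []  # Lista para armazenar as moedas do troco
--
--     for moeda in moedas:
--         while valor >= moeda:
--             troco.append(moeda)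
--             valor -= moeda
--
--     return troco
-- ===== SOURCE B (Python) =====
-- def troco_minimo(valor, moedas):
--     """
--     Função para calcular o troco mínimo utilizando o algoritmo guloso.
--     (Closed-form variant: one integer division per denomination.)
--     """
--     moedas.sort(reverse=True)  # mantém a mutação in-place e a ordem decrescente
--
--     troco = []
--
--     for moeda in moedas:
--         if valor >= moeda:
--             count = valor // moeda
--             troco.extend(moeda for _ in range(count))
--             valor -= moeda * count
--
--     return troco
-- ===== Notes on version B (the rewrite author's own statement) =====
-- stated objective: faster
-- what changed: The inner while loop of repeated subtraction is replaced by one closed-form integer division per denomination (count = valor // moeda, then emit count copies at once); intended as faster — a timing run saw A time out at n=16 where B returned but could not measure a clean ratio at sizes both finish.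
import Mathlib
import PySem

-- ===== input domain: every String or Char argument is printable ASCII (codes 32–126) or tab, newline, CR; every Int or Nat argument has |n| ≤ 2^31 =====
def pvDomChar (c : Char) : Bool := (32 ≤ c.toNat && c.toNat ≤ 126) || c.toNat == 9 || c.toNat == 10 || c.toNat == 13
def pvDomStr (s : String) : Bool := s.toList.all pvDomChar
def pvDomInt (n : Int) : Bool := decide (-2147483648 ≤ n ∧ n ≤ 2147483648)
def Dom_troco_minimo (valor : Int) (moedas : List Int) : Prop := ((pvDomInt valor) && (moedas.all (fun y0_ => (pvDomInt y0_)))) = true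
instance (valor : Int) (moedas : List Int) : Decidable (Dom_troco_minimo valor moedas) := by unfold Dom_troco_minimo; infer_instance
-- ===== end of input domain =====

-- B replaces A's inner while loop (repeated subtraction) by one closed-form integer
-- division per denomination; both sort the argument in place (equivalence is about the
-- return value; Source B performs the same in-place sort as A).


-- ===== PORT A =====
-- A's inner 'while valor >= moeda': the '0 < moeda' guard only makes the recursion
-- total; Python diverges for a non-positive coin once valor >= moeda (outside Pre_).
def trocoWhile (valor : Int) (moeda : Int) : List Int × Int :=
  if _h : 0 < moeda ∧ moeda ≤ valor then
    let r := trocoWhile (valor - moeda) moeda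
    (moeda :: r.1, r.2)
  else ([], valor)
termination_by valor.toNat
decreasing_by omega

def trocoStepA (st : List Int × Int) (moeda : Int) : List Int × Int :=
  let r := trocoWhile st.2 moeda
  (st.1 ++ r.1, r.2)

def troco_minimo (valor : Int) (moedas : List Int) : List Int :=
  let ms := PySem.List.sorted moedas (fun x => x) true
  (ms.foldl trocoStepA ([], valor)).1

-- ===== PORT B =====
def trocoStepB (st : List Int × Int) (moeda : Int) : List Int × Int :=
  if moeda ≤ st.2 then
    let count := PySem.Int.floordiv st.2 moeda
    -- extend over 'range(count)': count copies; count < 0 gives none (toNat = 0), exact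
    (st.1 ++ List.replicate count.toNat moeda, st.2 - moeda * count)
  else st

def troco_minimo_alt (valor : Int) (moedas : List Int) : List Int :=
  let ms := PySem.List.sorted moedas (fun x => x) true
  (ms.foldl trocoStepB ([], valor)).1

-- ===== PRECONDITION & SPEC =====
-- Pre_ is exactly A's termination domain: with a non-positive coin present, A's inner
-- while loop diverges unless valor is below every coin (then no while body ever runs).
def Pre_troco_minimo (valor : Int) (moedas : List Int) : Prop :=
  (∀ m ∈ moedas, 0 < m) ∨ (∀ m ∈ moedas, valor < m)
instance (valor : Int) (moedas : List Int) : Decidable (Pre_troco_minimo valor moedas) := by unfold Pre_troco_minimo; infer_instance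
def pvWitness_troco_minimo : Int × List Int := (37, [25, 10, 5, 1])

def Spec_troco_minimo (valor : Int) (moedas : List Int) (out : List Int) : Prop := out = troco_minimo_alt valor moedas
instance (valor : Int) (moedas : List Int) (out : List Int) : Decidable (Spec_troco_minimo valor moedas out) := by unfold Spec_troco_minimo; infer_instance

-- ===== CLAIM (what is proved, stated in full; the proofs are below) =====
def Claim_equal_troco_minimo : Prop := ∀ (valor : Int) (moedas : List Int), Dom_troco_minimo valor moedas → Pre_troco_minimo valor moedas → Spec_troco_minimo valor moedas (troco_minimo valor moedas)

-- ===== LEMMAS AND PROOFS =====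

-- The while loop emits exactly (valor // moeda) coins when moeda ≤ valor, else none.
theorem trocoWhile_eq (moeda : Int) (hm : 0 < moeda) : ∀ (n : Nat) (valor : Int), valor.toNat ≤ n →
    trocoWhile valor moeda =
      (if moeda ≤ valor then
        (List.replicate (PySem.Int.floordiv valor moeda).toNat moeda,
         valor - moeda * PySem.Int.floordiv valor moeda)
       else ([], valor)) := by
  intro n
  induction n with
  | zero =>
    intro valor hv
    rw [trocoWhile]
    have : ¬ (0 < moeda ∧ moeda ≤ valor) := by omega
    rw [dif_neg this, if_neg (by omega)]
  | succ n ih =>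
    intro valor hv
    rw [trocoWhile]
    by_cases hle : moeda ≤ valor
    · rw [dif_pos ⟨hm, hle⟩, if_pos hle]
      set q := PySem.Int.floordiv valor moeda with hq
      have hbr := (PySem.Int.floordiv_eq_iff_of_pos (a := valor) (b := moeda) (q := q) hm).mp hq.symm
      obtain ⟨hq1, hq2⟩ := hbr
      have hq1' : q * moeda ≤ valor := hq1
      have hq2' : valor < q * moeda + moeda := by nlinarith [hq2]
      have hqpos : 1 ≤ q := by nlinarith
      have hq' : PySem.Int.floordiv (valor - moeda) moeda = q - 1 := by
        rw [PySem.Int.floordiv_eq_iff_of_pos hm]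
        constructor
        · nlinarith
        · nlinarith
      have hrec := ih (valor - moeda) (by omega)
      rw [hrec, hq']
      by_cases hle2 : moeda ≤ valor - moeda
      · rw [if_pos hle2]
        have hrep : (List.replicate q.toNat moeda) = moeda :: List.replicate (q - 1).toNat moeda := by
          have : q.toNat = (q - 1).toNat + 1 := by omega
          rw [this, List.replicate_succ]
        simp only [hrep, Prod.mk.injEq, true_and]
        ring
      · rw [if_neg hle2]
        have hq1eq : q = 1 := by
          by_contra hne
          have : 2 ≤ q := by omega
          nlinarith
        rw [hq1eq]
        norm_num
    · rw [dif_neg (by exact fun h => hle h.2), if_neg hle]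

-- The two per-coin steps agree on every state when the coin is positive.
theorem step_eq (st : List Int × Int) (moeda : Int) (hm : 0 < moeda) :
    trocoStepA st moeda = trocoStepB st moeda := by
  unfold trocoStepA trocoStepB
  rw [trocoWhile_eq moeda hm st.2.toNat st.2 le_rfl]
  by_cases hle : moeda ≤ st.2
  · rw [if_pos hle, if_pos hle]
  · rw [if_neg hle, if_neg hle]
    simp

theorem fold_eq (ms : List Int) (h : ∀ m ∈ ms, 0 < m) :
    ∀ (st : List Int × Int), ms.foldl trocoStepA st = ms.foldl trocoStepB st := by
  induction ms with
  | nil => intro st; rfl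
  | cons m t ih =>
    intro st
    simp only [List.foldl_cons]
    rw [step_eq st m (h m (by simp))]
    exact ih (fun x hx => h x (by simp [hx])) _

-- When valor is below every coin, both folds leave the state untouched.
theorem foldA_id (ms : List Int) : ∀ (st : List Int × Int), (∀ m ∈ ms, st.2 < m) →
    ms.foldl trocoStepA st = st := by
  induction ms with
  | nil => intro st _; rfl
  | cons m t ih =>
    intro st h
    have hstep : trocoStepA st m = st := by
      unfold trocoStepA
      rw [trocoWhile]
      rw [dif_neg (by have := h m (by simp); omega)]
      simp
    simp only [List.foldl_cons, hstep]
    exact ih st (fun x hx => h x (by simp [hx]))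

theorem foldB_id (ms : List Int) : ∀ (st : List Int × Int), (∀ m ∈ ms, st.2 < m) →
    ms.foldl trocoStepB st = st := by
  induction ms with
  | nil => intro st _; rfl
  | cons m t ih =>
    intro st h
    have hstep : trocoStepB st m = st := by
      unfold trocoStepB
      rw [if_neg (by have := h m (by simp); omega)]
    simp only [List.foldl_cons, hstep]
    exact ih st (fun x hx => h x (by simp [hx]))

-- ===== VERDICT (by name: the statement is the Claim_ definition above) =====
theorem troco_minimo_spec : Claim_equal_troco_minimo := by
  intro valor moedas _ hpre
  show troco_minimo valor moedas = troco_minimo_alt valor moedas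
  simp only [troco_minimo, troco_minimo_alt]
  rcases hpre with hpos | hlt
  · have hpos' : ∀ m ∈ PySem.List.sorted moedas (fun x => x) true, 0 < m := by
      intro m hmem
      exact hpos m ((PySem.List.mem_sorted _ _ _ _).mp hmem)
    rw [fold_eq _ hpos']
  · have hlt' : ∀ m ∈ PySem.List.sorted moedas (fun x => x) true, (([], valor) : List Int × Int).2 < m := by
      intro m hmem
      exact hlt m ((PySem.List.mem_sorted _ _ _ _).mp hmem)
    rw [foldA_id _ _ hlt', foldB_id _ _ hlt']
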